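-- pv_equiv track=rewrite | github.com/troff-vicc/marioGame | Mario/physics.py | completionMatrix0
-- ===== SOURCE A (Python) =====
-- def completionMatrix1(matrix):
--     # создание 1го уровня
--     # тип текстуры 1 - фон, 2 - кирпич, 3 - вопрос, 4 - труба
--     matrix = [
--         #0  1  2  3  4  5  6  7  8  9  10 11 12 13 14 15
--         [0, 0, 0, 0, 0, 0, 0, 0, 0, 0, 0, 0, 0, 0, 0, 0],# 0
--         [0, 0, 0, 0, 0, 0, 0, 0, 0, 0, 0, 0, 0, 0, 0, 0],# 1
--         [0, 0, 0, 0, 0, 0, 0, 0, 0, 0, 0, 0, 0, 0, 0, 0],# 2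
--         [0, 0, 0, 0, 0, 0, 0, 0, 0, 0, 0, 0, 0, 0, 0, 0],# 3
--         [0, 0, 0, 0, 0, 0, 0, 0, 0, 0, 0, 0, 0, 0, 0, 0],# 4
--         [0, 0, 0, 0, 0, 0, 0, 0, 0, 0, 0, 0, 0, 0, 0, 0],# 5
--         [0, 0, 0, 0, 0, 0, 0, 0, 0, 0, 0, 0, 0, 0, 0, 0],# 6
--         [0, 0, 0, 0, 0, 0, 0, 3, 0, 0, 0, 0, 0, 0, 0, 0],# 7
--         [0, 0, 0, 0, 0, 0, 0, 0, 0, 0, 0, 0, 0, 0, 0, 0],# 8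
--         [0, 0, 0, 0, 0, 0, 0, 0, 0, 0, 0, 0, 0, 0, 0, 0],# 9
--         [0, 0, 3, 0, 0, 2, 3, 2, 3, 2, 0, 0, 0, 0, 0, 0],# 10
--         [0, 0, 0, 0, 0, 0, 0, 0, 0, 0, 0, 0, 0, 0, 0, 0],# 11
--         [0, 0, 0, 0, 0, 0, 0, 0, 0, 0, 0, 0, 0, 0, 4, 0],# 12
--         [0, 0, 0, 0, 0, 0, 0, 0, 0, 0, 0, 0, 0, 0, 0, 0],# 13
--         [1, 1, 1, 1, 1, 1, 1, 1, 1, 1, 1, 1, 1, 1, 1, 1],# 14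
--         [1, 1, 1, 1, 1, 1, 1, 1, 1, 1, 1, 1, 1, 1, 1, 1] # 15
--     ]
--
--     '''briks = [
--         [6, 10],
--         [8, 10],
--         [10, 10]
--     ]
--     questions = [
--         [2, 10],
--         [7, 10],
--         [9, 10],
--         [8, 7]
--     ]
--     pipes = [[14, 11],[15, 12],[14, 13],[15, 13]]
--     floors = [[x, 14] for x in range(16)] + [[x, 15] for x in range(16)]
--
--     for brik in briks:
--         matrix[brik[1]][brik[0]] = 2
--     for question in questions:
--         matrix[question[1]][question[0]] = 3
--     for pipe in pipes:
--         matrix[pipe[1]][pipe[0]] = 4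
--     for floor in floors:
--         matrix[floor[1]][floor[0]] = 1'''
--     return matrix
--
-- def completionMatrix0(world):
--     matrix = []
--     for o in range(16):
--         a = []
--         for _ in range(16):
--             a.append(0)
--         matrix.append(a)
--     if world == 1:
--         matrix = completionMatrix1(matrix)
--     return matrix
-- ===== SOURCE B (Python) =====
-- def completionMatrix0(world):
--     # Generative formulation: each cell is computed by a pure rule tile(r, c)
--     # instead of allocating a zero grid and overwriting entries / a literal.
--     def tile(r, c):
--         if world != 1:
--             return 0
--         if r >= 14:
--             return 1          # floor
--         if r == 7 and c == 7:
--             return 3          # lone question block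
--         if r == 10:
--             if c == 2:
--                 return 3
--             if 5 <= c <= 9:
--                 return 3 if c % 2 == 0 else 2   # alternating ?-blocks and bricks
--         if r == 12 and c == 14:
--             return 4          # pipe
--         return 0
--     return [[tile(r, c) for c in range(16)] for r in range(16)]
-- ===== Notes on version B (the rewrite author's own statement) =====
-- stated objective: alternative
-- what changed: Replaces A's imperative construction (append-loops building a zero grid, then a hardcoded 16x16 literal for world 1) by a generative rule: every cell is computed by a pure function tile(r,c) of its coordinates, and the grid is one double comprehension with no mutation or literal table.
import Mathlib
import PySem

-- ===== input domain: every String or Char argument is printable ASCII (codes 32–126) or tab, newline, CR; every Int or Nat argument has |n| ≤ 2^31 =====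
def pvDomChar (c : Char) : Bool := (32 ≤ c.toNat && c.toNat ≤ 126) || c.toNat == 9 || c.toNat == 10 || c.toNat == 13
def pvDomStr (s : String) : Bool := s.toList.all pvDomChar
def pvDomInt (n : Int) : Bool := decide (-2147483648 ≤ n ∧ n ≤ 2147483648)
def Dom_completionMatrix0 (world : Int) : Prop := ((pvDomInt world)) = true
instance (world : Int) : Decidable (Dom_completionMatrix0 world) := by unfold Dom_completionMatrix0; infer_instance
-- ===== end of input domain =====

-- ===== PORT A =====
-- B computes each cell from a coordinate rule instead of A's literal table; objective: alternative.
-- helper of A: ignores its argument (as the Python does) and returns the literal level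
def completionMatrix1 (matrix : List (List Int)) : List (List Int) :=
  [[0, 0, 0, 0, 0, 0, 0, 0, 0, 0, 0, 0, 0, 0, 0, 0],
   [0, 0, 0, 0, 0, 0, 0, 0, 0, 0, 0, 0, 0, 0, 0, 0],
   [0, 0, 0, 0, 0, 0, 0, 0, 0, 0, 0, 0, 0, 0, 0, 0],
   [0, 0, 0, 0, 0, 0, 0, 0, 0, 0, 0, 0, 0, 0, 0, 0],
   [0, 0, 0, 0, 0, 0, 0, 0, 0, 0, 0, 0, 0, 0, 0, 0],
   [0, 0, 0, 0, 0, 0, 0, 0, 0, 0, 0, 0, 0, 0, 0, 0],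
   [0, 0, 0, 0, 0, 0, 0, 0, 0, 0, 0, 0, 0, 0, 0, 0],
   [0, 0, 0, 0, 0, 0, 0, 3, 0, 0, 0, 0, 0, 0, 0, 0],
   [0, 0, 0, 0, 0, 0, 0, 0, 0, 0, 0, 0, 0, 0, 0, 0],
   [0, 0, 0, 0, 0, 0, 0, 0, 0, 0, 0, 0, 0, 0, 0, 0],
   [0, 0, 3, 0, 0, 2, 3, 2, 3, 2, 0, 0, 0, 0, 0, 0],
   [0, 0, 0, 0, 0, 0, 0, 0, 0, 0, 0, 0, 0, 0, 0, 0],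
   [0, 0, 0, 0, 0, 0, 0, 0, 0, 0, 0, 0, 0, 0, 4, 0],
   [0, 0, 0, 0, 0, 0, 0, 0, 0, 0, 0, 0, 0, 0, 0, 0],
   [1, 1, 1, 1, 1, 1, 1, 1, 1, 1, 1, 1, 1, 1, 1, 1],
   [1, 1, 1, 1, 1, 1, 1, 1, 1, 1, 1, 1, 1, 1, 1, 1]]

def completionMatrix0 (world : Int) : List (List Int) :=
  let matrix : List (List Int) :=
    (PySem.List.pyRange 0 16 1).foldl (fun m _ =>
      let a : List Int := (PySem.List.pyRange 0 16 1).foldl (fun a _ => a ++ [0]) []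
      m ++ [a]) []
  if world == 1 then completionMatrix1 matrix else matrix

-- ===== PORT B =====
-- helper of B: the per-cell rule tile(r, c) (closure over world, as in Source B)
def pvTile (world : Int) (r c : Nat) : Int :=
  if world != 1 then 0
  else if r >= 14 then 1
  else if r == 7 && c == 7 then 3
  else if r == 10 && c == 2 then 3
  else if r == 10 && (5 <= c && c <= 9) then (if c % 2 == 0 then 3 else 2)
  else if r == 12 && c == 14 then 4
  else 0

def completionMatrix0_alt (world : Int) : List (List Int) :=
  (List.range 16).map (fun r => (List.range 16).map (fun c => pvTile world r c))

-- ===== PRECONDITION & SPEC =====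
def Spec_completionMatrix0 (world : Int) (out : List (List Int)) : Prop := out = completionMatrix0_alt world
instance (world : Int) (out : List (List Int)) : Decidable (Spec_completionMatrix0 world out) := by unfold Spec_completionMatrix0; infer_instance

-- ===== CLAIM (what is proved, stated in full; the proofs are below) =====
def Claim_equal_completionMatrix0 : Prop := ∀ (world : Int), Dom_completionMatrix0 world → Spec_completionMatrix0 world (completionMatrix0 world)

-- ===== LEMMAS AND PROOFS =====

-- ===== VERDICT (by name: the statement is the Claim_ definition above) =====
theorem completionMatrix0_spec : Claim_equal_completionMatrix0 := by
  intro world _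
  unfold Spec_completionMatrix0 completionMatrix0 completionMatrix0_alt
  by_cases h : world = 1
  · subst h; decide
  · have ht : ∀ r c : Nat, pvTile world r c = 0 := by
      intro r c; simp [pvTile, bne_iff_ne, h]
    simp only [beq_iff_eq, if_neg h, ht]
    decide
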